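-- pv_equiv track=rewrite | github.com/ericjardon/python-coding-problems | challenges/fb/seating_guests.py | minOverallAwkwardness
-- ===== SOURCE A (Python) =====
-- from collections import deque
--
-- def place(table, end, guest):
--   if end == -1:
--     pair = table[-1]
--     table.append(guest)
--     return abs(guest - pair)
--
--   else:
--     pair = table[0]
--     table.appendleft(guest)
--     return abs(guest - pair)
--
-- def minOverallAwkwardness(arr):
--   # array of heights. Guests are 1-indexed.
--
--   # Awkwardess[i] = abs(heigh[i] - height[j])
--   # Due to circular table, there are N adjacencies among N guests.
--   # AwkwardnessOverall = max(awkwardness) among the N pairs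
--
--   # For a given list of guests, determine the minimum possible max awkwardness.
--
--   # We cannot simply sort because the last pair (N:1) will have biggest difference.
--   # Instead, we can pick the max value and sit the next two tallest around him,
--   # and for the rest of the guests, place the next tallest in the bigger end.
--
--   max_awk =  -1
--   table = deque()
--
--   arr.sort()  # min length is 3
--
--   table.append(arr.pop())  # max height guest
--   while arr:
--     # pop next and place in the tallest end
--     if table[0] > table[-1]:
--       awk = place(table, 0, arr.pop())
--     else:
--       awk = place(table, -1, arr.pop())
--
--     max_awk = max(awk, max_awk)
--
--   return max_awk
-- ===== SOURCE B (Python) =====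
-- def minOverallAwkwardness(arr):
--     # Sort a copy and read the answer off directly: the optimal circular seating
--     # alternates the sorted heights, so the adjacent differences are exactly
--     # s[i+2]-s[i] plus the top pair s[-1]-s[-2].  (Unlike the original, arr is
--     # not mutated; equivalence is about the return value.)
--     s = sorted(arr)
--     res = -1
--     for i in range(len(s) - 2):
--         res = max(res, s[i + 2] - s[i])
--     if len(s) >= 2:
--         res = max(res, s[-1] - s[-2])
--     return res
-- ===== Notes on version B (the rewrite author's own statement) =====
-- stated objective: simpler
-- what changed: B replaces the deque-based seating simulation (pop tallest, zig-zag placement, tracking both deque ends) by a single closed-form scan over the sorted list: the answer is the max of the gaps two apart in sorted order together with the gap between the two tallest; no deque, no placement loop, and arr is not mutated.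
-- outside the precondition, e.g. on minOverallAwkwardness([]): A raises IndexError, B returns -1
import Mathlib
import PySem

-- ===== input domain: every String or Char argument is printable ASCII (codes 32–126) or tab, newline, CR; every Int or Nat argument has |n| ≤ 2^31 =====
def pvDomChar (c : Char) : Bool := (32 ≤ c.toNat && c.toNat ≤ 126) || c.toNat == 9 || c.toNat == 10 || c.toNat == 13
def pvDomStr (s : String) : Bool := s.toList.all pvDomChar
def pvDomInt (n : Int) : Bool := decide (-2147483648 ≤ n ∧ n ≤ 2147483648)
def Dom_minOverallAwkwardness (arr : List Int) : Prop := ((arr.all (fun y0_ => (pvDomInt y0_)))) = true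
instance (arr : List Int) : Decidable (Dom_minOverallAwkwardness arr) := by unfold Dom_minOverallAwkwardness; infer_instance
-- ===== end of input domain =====

-- B replaces A's deque seating simulation by a closed-form scan over the sorted list (simpler);
-- equivalence is about the RETURN value only (A empties arr in place, B leaves it unchanged).

-- ===== PORT A =====

-- place(table, end, guest): pair with the given end of the deque, put the guest there.
def pyPlace (table : List Int) (end_ : Int) (guest : Int) : List Int × Int :=
  if end_ = -1 then
    let pair := (PySem.List.pyGet? table (-1)).getD 0   -- table[-1]; table is never empty here
    (table ++ [guest], |guest - pair|)
  else
    let pair := (PySem.List.pyGet? table 0).getD 0      -- table[0]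
    (guest :: table, |guest - pair|)

-- the 'while arr:' loop: pop from the back of arr, place at the taller end of table.
def pyLoop (arr : List Int) (table : List Int) (maxAwk : Int) : Int :=
  if h : arr = [] then maxAwk
  else
    let g := arr.getLast?.getD 0                        -- arr.pop(); arr ≠ [] here
    let r :=
      if (PySem.List.pyGet? table 0).getD 0 > (PySem.List.pyGet? table (-1)).getD 0 then
        pyPlace table 0 g
      else
        pyPlace table (-1) g
    pyLoop arr.dropLast r.1 (max r.2 maxAwk)
termination_by arr.length
decreasing_by
  have := List.length_pos_of_ne_nil h
  simp [List.length_dropLast]; omega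

def minOverallAwkwardness (arr : List Int) : Int :=
  let s := PySem.List.sorted arr (fun x => x) false     -- arr.sort()
  let g0 := s.getLast?.getD 0                           -- arr.pop(); Pre_ excludes arr = [] (IndexError)
  pyLoop s.dropLast [g0] (-1)

-- ===== PORT B =====

def minOverallAwkwardness_alt (arr : List Int) : Int :=
  let s := PySem.List.sorted arr (fun x => x) false     -- s = sorted(arr)
  let res := (PySem.List.pyRange 0 ((s.length : Int) - 2) 1).foldl
    (fun res i =>
      max res ((PySem.List.pyGet? s (i + 2)).getD 0 - (PySem.List.pyGet? s i).getD 0))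
    (-1)
  if 2 ≤ s.length then
    max res ((PySem.List.pyGet? s (-1)).getD 0 - (PySem.List.pyGet? s (-2)).getD 0)
  else res

-- ===== PRECONDITION & SPEC =====
-- Pre_ excludes exactly the empty list, on which A's 'arr.pop()' raises IndexError.
def Pre_minOverallAwkwardness (arr : List Int) : Prop := arr ≠ []
instance (arr : List Int) : Decidable (Pre_minOverallAwkwardness arr) := by
  unfold Pre_minOverallAwkwardness; infer_instance

def pvWitness_minOverallAwkwardness : List Int := [5, 1, 3]

def Spec_minOverallAwkwardness (arr : List Int) (out : Int) : Prop := out = minOverallAwkwardness_alt arr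
instance (arr : List Int) (out : Int) : Decidable (Spec_minOverallAwkwardness arr out) := by
  unfold Spec_minOverallAwkwardness; infer_instance

-- ===== CLAIM (what is proved, stated in full; the proofs are below) =====
def Claim_equal_minOverallAwkwardness : Prop := ∀ (arr : List Int), Dom_minOverallAwkwardness arr → Pre_minOverallAwkwardness arr → Spec_minOverallAwkwardness arr (minOverallAwkwardness arr)


-- ===== LEMMAS AND PROOFS =====

-- A's loop, abstracted to the only table data it reads: the reversed remaining list,
-- the head h and the last l of the deque.
def loopR : List Int → Int → Int → Int → Int
  | [], _, _, acc => acc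
  | g :: gs, h, l, acc =>
      if h > l then loopR gs g l (max |g - h| acc)
      else loopR gs h g (max |g - l| acc)

-- the same loop once the invariant (min, max of the two deque ends) is in place
def foldD : List Int → Int → Int → Int → Int
  | [], _, _, acc => acc
  | g :: gs, x, y, acc => foldD gs g x (max (y - g) acc)

lemma pyGet_zero (xs : List Int) (a : Int) (h : xs.head? = some a) :
    (PySem.List.pyGet? xs 0).getD 0 = a := by
  simp [PySem.List.pyGet?, PySem.List.pyIdx?]
  cases xs <;> simp_all

lemma pyGet_neg_one (xs : List Int) (a : Int) (h : xs.getLast? = some a) :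
    (PySem.List.pyGet? xs (-1)).getD 0 = a := by
  have hne : xs ≠ [] := by rintro rfl; simp at h
  have hl : 0 < xs.length := List.length_pos_of_ne_nil hne
  simp only [PySem.List.pyGet?, PySem.List.pyIdx?]
  rw [if_neg (by omega), if_pos (by omega)]
  rw [List.getLast?_eq_getElem?] at h
  simp [h]

lemma pyGet_neg_two (xs : List Int) (h2 : 2 ≤ xs.length) :
    (PySem.List.pyGet? xs (-2)).getD 0 = xs.getD (xs.length - 2) 0 := by
  simp only [PySem.List.pyGet?, PySem.List.pyIdx?]
  rw [if_neg (by omega), if_pos (by omega)]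
  have he : xs.length - (-(-2:Int)).toNat = xs.length - 2 := rfl
  rw [he]
  simp [List.getD]

lemma pyGet_natCast (xs : List Int) (k : Nat) :
    (PySem.List.pyGet? xs (k : Int)).getD 0 = xs.getD k 0 := by
  simp only [PySem.List.pyGet?, PySem.List.pyIdx?]
  by_cases hk : k < xs.length
  · rw [if_pos (by omega), if_pos (by exact_mod_cast hk)]
    simp [List.getD]
  · rw [if_pos (by omega), if_neg (by exact_mod_cast hk)]
    simp only [Option.bind_none, Option.getD_none, List.getD]
    rw [List.getElem?_eq_none (by omega : xs.length ≤ k)]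
    rfl

-- pyLoop reads only the two ends of the deque
lemma pyLoop_eq_loopR (arr : List Int) : ∀ (table : List Int) (acc h l : Int),
    table.head? = some h → table.getLast? = some l →
    pyLoop arr table acc = loopR arr.reverse h l acc := by
  induction arr using List.reverseRecOn with
  | nil => intro table acc h l _ _; rw [pyLoop]; simp [loopR]
  | append_singleton as g ih =>
    intro table acc h l hh hl
    have hne : table ≠ [] := by rintro rfl; simp at hh
    rw [pyLoop]
    rw [dif_neg (by simp)]
    simp only [List.getLast?_concat, List.dropLast_concat, Option.getD_some,
      List.reverse_append, List.reverse_cons, List.reverse_nil, List.nil_append,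
      List.cons_append, loopR]
    rw [pyGet_zero table h hh, pyGet_neg_one table l hl]
    by_cases hcmp : h > l
    · rw [if_pos hcmp, if_pos hcmp]
      simp only [pyPlace, if_neg (by norm_num : ¬ (0:Int) = -1)]
      rw [pyGet_zero table h hh]
      refine ih (g :: table) _ g l rfl ?_
      rw [List.getLast?_cons, hl]
      rfl
    · rw [if_neg hcmp, if_neg hcmp]
      simp only [pyPlace]
      rw [pyGet_neg_one table l hl]
      exact ih (table ++ [g]) _ h g
        (by rw [List.head?_append_of_ne_nil _ hne]; exact hh) List.getLast?_concat

-- the zig-zag invariant: the two deque ends are always (min, max) of the last two seated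
lemma loopR_eq_foldD : ∀ (r : List Int) (h l acc : Int),
    (∀ g ∈ r, g ≤ min h l) → r.Pairwise (fun a b => b ≤ a) →
    loopR r h l acc = foldD r (min h l) (max h l) acc := by
  intro r
  induction r with
  | nil => intro h l acc _ _; rfl
  | cons g gs ih =>
    intro h l acc hall hpw
    have hg : g ≤ min h l := hall g (by simp)
    have hgs : ∀ b ∈ gs, b ≤ g := (List.pairwise_cons.mp hpw).1
    have hpw' := (List.pairwise_cons.mp hpw).2
    simp only [loopR, foldD]
    by_cases hcmp : h > l
    · rw [if_pos hcmp]
      have h1 : |g - h| = h - g := by rw [abs_sub_comm]; exact abs_of_nonneg (by omega)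
      have h2 : min h l = l := by omega
      have h3 : max h l = h := by omega
      rw [h1, h2, h3, ih g l _ (fun b hb => by have := hgs b hb; omega) hpw']
      have h4 : min g l = g := by omega
      have h5 : max g l = l := by omega
      rw [h4, h5]
    · rw [if_neg hcmp]
      have h1 : |g - l| = l - g := by rw [abs_sub_comm]; exact abs_of_nonneg (by omega)
      have h2 : min h l = h := by omega
      have h3 : max h l = l := by omega
      rw [h1, h2, h3, ih h g _ (fun b hb => by have := hgs b hb; omega) hpw']
      have h4 : min h g = g := by omega
      have h5 : max h g = h := by omega
      rw [h4, h5]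

-- the per-step differences are exactly zipWith (·-·) (y :: x :: r) r
lemma foldD_eq_foldl : ∀ (r : List Int) (x y acc : Int),
    foldD r x y acc =
      (List.zipWith (fun u v => u - v) (y :: x :: r) r).foldl (fun a d => max d a) acc := by
  intro r
  induction r with
  | nil => intro x y acc; rfl
  | cons g gs ih =>
    intro x y acc
    simp only [foldD, List.zipWith, List.foldl]
    rw [ih]

-- reversing the scanned list reverses the difference list
lemma zip2_rev (l : List Int) :
    List.zipWith (fun u v => u - v) l.reverse (l.reverse.drop 2) =
      (List.zipWith (fun u v => u - v) (l.drop 2) l).reverse := by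
  apply List.ext_getElem
  · simp only [List.length_zipWith, List.length_reverse, List.length_drop]; omega
  · intro i h1 h2
    have hlen : i < l.length - 2 := by
      simp only [List.length_zipWith, List.length_reverse, List.length_drop] at h1; omega
    simp only [List.getElem_zipWith, List.getElem_reverse, List.getElem_drop,
      List.length_zipWith, List.length_drop]
    congr 1
    all_goals exact getElem_congr rfl (by omega) (by omega)

-- folding max over a list with an extra element merged into the accumulator
lemma foldl_max_out (l : List Int) (a c : Int) :
    l.foldl (fun a d => max d a) (max c a) = max (l.foldl (fun a d => max d a) a) c := by
  induction l generalizing a with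
  | nil => simp only [List.foldl]; omega
  | cons d ds ih =>
    simp only [List.foldl]
    rw [show max d (max c a) = max c (max d a) by omega, ih]

-- folding max is insensitive to reversing the list
lemma foldl_max_reverse (l : List Int) (a : Int) :
    l.reverse.foldl (fun a d => max d a) a = l.foldl (fun a d => max d a) a := by
  induction l generalizing a with
  | nil => rfl
  | cons x xs ih =>
    simp only [List.reverse_cons, List.foldl_append, List.foldl, ih]
    rw [foldl_max_out xs a x]
    omega

-- B's range fold is the fold over the ascending difference list
lemma B_fold (s : List Int) :
    (PySem.List.pyRange 0 ((s.length : Int) - 2) 1).foldl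
      (fun res i =>
        max res ((PySem.List.pyGet? s (i + 2)).getD 0 - (PySem.List.pyGet? s i).getD 0)) (-1) =
    (List.zipWith (fun u v => u - v) (s.drop 2) s).foldl (fun a d => max d a) (-1) := by
  by_cases h2 : 2 ≤ s.length
  · have hcast : (s.length : Int) - 2 = ((s.length - 2 : Nat) : Int) := by omega
    rw [hcast, PySem.List.pyRange_zero_natCast, List.foldl_map]
    have hz : List.zipWith (fun u v => u - v) (s.drop 2) s =
        (List.range (s.length - 2)).map (fun k => s.getD (k + 2) 0 - s.getD k 0) := by
      apply List.ext_getElem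
      · simp only [List.length_zipWith, List.length_drop, List.length_map, List.length_range]
        omega
      · intro i hi1 hi2
        have hlen : i < s.length - 2 := by
          simp only [List.length_zipWith, List.length_drop] at hi1; omega
        simp only [List.getElem_zipWith, List.getElem_drop, List.getElem_map, List.getElem_range]
        rw [List.getD_eq_getElem _ _ (by omega), List.getD_eq_getElem _ _ (by omega)]
        congr 1
        all_goals exact getElem_congr rfl (by omega) (by omega)
    rw [hz, List.foldl_map]
    rw [PySem.List.foldl_congr_mem _ _
      (fun a k => max (s.getD (k + 2) 0 - s.getD k 0) a) _ ?_]
    intro a k _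
    have hcast2 : (k : Int) + 2 = ((k + 2 : Nat) : Int) := by push_cast; ring
    rw [hcast2, pyGet_natCast, pyGet_natCast, max_comm]
  · have h01 : s.length = 0 ∨ s.length = 1 := by omega
    have hdrop : s.drop 2 = [] := List.drop_eq_nil_of_le (by omega)
    rw [hdrop]
    rcases h01 with h | h <;> rw [h] <;> norm_num

-- main equivalence on an arbitrary sorted nonempty list
lemma core (s : List Int) (hp : s.Pairwise (fun a b => a ≤ b)) (hne : s ≠ []) :
    pyLoop s.dropLast [s.getLast?.getD 0] (-1) =
      (if 2 ≤ s.length then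
        max ((PySem.List.pyRange 0 ((s.length : Int) - 2) 1).foldl
          (fun res i =>
            max res ((PySem.List.pyGet? s (i + 2)).getD 0 - (PySem.List.pyGet? s i).getD 0)) (-1))
          ((PySem.List.pyGet? s (-1)).getD 0 - (PySem.List.pyGet? s (-2)).getD 0)
      else (PySem.List.pyRange 0 ((s.length : Int) - 2) 1).foldl
          (fun res i =>
            max res ((PySem.List.pyGet? s (i + 2)).getD 0 - (PySem.List.pyGet? s i).getD 0)) (-1)) := by
  rcases List.eq_nil_or_concat s with rfl | ⟨s', m, rfl⟩
  · exact absurd rfl hne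
  rw [List.concat_eq_append] at *
  have hglast : (s' ++ [m]).getLast?.getD 0 = m := by rw [List.getLast?_concat]; rfl
  rw [hglast, List.dropLast_concat]
  rw [pyLoop_eq_loopR s' [m] (-1) m m rfl rfl]
  have hall : ∀ g ∈ s'.reverse, g ≤ min m m := by
    intro g hg
    rw [List.mem_reverse] at hg
    have := (List.pairwise_append.mp hp).2.2 g hg m (by simp)
    omega
  have hchain : s'.reverse.Pairwise (fun a b => b ≤ a) := by
    rw [List.pairwise_reverse]
    exact (List.pairwise_append.mp hp).1
  rw [loopR_eq_foldD s'.reverse m m (-1) hall hchain, min_self, max_self, foldD_eq_foldl]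
  rcases List.eq_nil_or_concat s' with rfl | ⟨s'', m2, rfl⟩
  · -- singleton: no adjacent pair, both sides return -1
    norm_num
  rw [List.concat_eq_append] at *
  have hrev : (s'' ++ [m2]).reverse = m2 :: s''.reverse := by simp
  have hlen2 : 2 ≤ ((s'' ++ [m2]) ++ [m]).length := by simp
  rw [if_pos hlen2]
  -- left side: the difference list is (m - m2) :: reverse of the ascending difference list
  have hLlist : List.zipWith (fun u v => u - v) (m :: m :: (s'' ++ [m2]).reverse) ((s'' ++ [m2]).reverse)
      = (m - m2) :: (List.zipWith (fun u v => u - v) ((((s'' ++ [m2]) ++ [m])).drop 2) ((s'' ++ [m2]) ++ [m])).reverse := by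
    rw [hrev]
    have hrev2 : ((s'' ++ [m2]) ++ [m]).reverse = m :: m2 :: s''.reverse := by simp
    have := zip2_rev ((s'' ++ [m2]) ++ [m])
    rw [hrev2] at this
    simp only [List.drop] at this
    rw [← this]
    rfl
  rw [hLlist]
  simp only [List.foldl]
  rw [foldl_max_reverse]
  rw [foldl_max_out]
  -- right side: the two negative indices are m and m2
  have hm : (PySem.List.pyGet? ((s'' ++ [m2]) ++ [m]) (-1)).getD 0 = m :=
    pyGet_neg_one _ _ List.getLast?_concat
  have hm2 : (PySem.List.pyGet? ((s'' ++ [m2]) ++ [m]) (-2)).getD 0 = m2 := by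
    rw [pyGet_neg_two _ hlen2, List.append_assoc]
    have hl : (s'' ++ ([m2] ++ [m])).length - 2 = s''.length := by simp
    rw [hl, List.getD_append_right _ _ _ _ (le_refl _)]
    simp [List.getD]
  rw [hm, hm2, B_fold]

-- ===== VERDICT (by name: the statement is the Claim_ definition above) =====
theorem minOverallAwkwardness_spec : Claim_equal_minOverallAwkwardness := by
  intro arr _ hpre
  unfold Spec_minOverallAwkwardness
  simp only [minOverallAwkwardness, minOverallAwkwardness_alt]
  have hp := PySem.List.sorted_pairwise arr (fun x => x)
  have hne : PySem.List.sorted arr (fun x => x) false ≠ [] := by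
    rw [ne_eq, PySem.List.sorted_eq_nil_iff]; exact hpre
  exact core _ hp hne
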